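-- pv_equiv track=rewrite | github.com/Wulfic/Cicada3301 | LiberPrimus/tools/verify_p17_thorough.py | text_to_key
-- ===== SOURCE A (Python) =====
-- def text_to_key(text):
--     """Convert text to key indices"""
--     LATIN_TO_IDX = {'F':0,'U':1,'V':1,'TH':2,'O':3,'R':4,'C':5,'K':5,'G':6,
--                     'W':7,'H':8,'N':9,'I':10,'J':11,'EO':12,'P':13,'X':14,
--                     'S':15,'T':16,'B':17,'E':18,'M':19,'L':20,'NG':21,'OE':22,
--                     'D':23,'A':24,'AE':25,'Y':26,'IA':27,'IO':27,'EA':28,'Q':5,'Z':15}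
--     key = []
--     i = 0
--     text = text.upper()
--     while i < len(text):
--         if i + 1 < len(text):
--             digraph = text[i:i+2]
--             if digraph in LATIN_TO_IDX:
--                 key.append(LATIN_TO_IDX[digraph])
--                 i += 2
--                 continue
--         if text[i] in LATIN_TO_IDX:
--             key.append(LATIN_TO_IDX[text[i]])
--         i += 1
--     return key
-- ===== SOURCE B (Python) =====
-- def text_to_key(text):
--     """Convert text to key indices"""
--     LATIN_TO_IDX = {'F':0,'U':1,'V':1,'TH':2,'O':3,'R':4,'C':5,'K':5,'G':6,
--                     'W':7,'H':8,'N':9,'I':10,'J':11,'EO':12,'P':13,'X':14,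
--                     'S':15,'T':16,'B':17,'E':18,'M':19,'L':20,'NG':21,'OE':22,
--                     'D':23,'A':24,'AE':25,'Y':26,'IA':27,'IO':27,'EA':28,'Q':5,'Z':15}
--     key = []
--     pending = ''
--     for c in text.upper():
--         if pending:
--             v = LATIN_TO_IDX.get(pending + c)
--             if v is not None:
--                 key.append(v)
--                 pending = ''
--                 continue
--             v = LATIN_TO_IDX.get(pending)
--             if v is not None:
--                 key.append(v)
--         pending = c
--     if pending:
--         v = LATIN_TO_IDX.get(pending)
--         if v is not None:
--             key.append(v)
--     return key
-- ===== Notes on version B (the rewrite author's own statement) =====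
-- stated objective: alternative
-- what changed: Replaced the index-based while loop with string slicing and lookahead by a single left-to-right pass over the characters that keeps one pending character as state, deciding digraph vs single when the next character arrives and flushing the pending character at the end.
import Mathlib
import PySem

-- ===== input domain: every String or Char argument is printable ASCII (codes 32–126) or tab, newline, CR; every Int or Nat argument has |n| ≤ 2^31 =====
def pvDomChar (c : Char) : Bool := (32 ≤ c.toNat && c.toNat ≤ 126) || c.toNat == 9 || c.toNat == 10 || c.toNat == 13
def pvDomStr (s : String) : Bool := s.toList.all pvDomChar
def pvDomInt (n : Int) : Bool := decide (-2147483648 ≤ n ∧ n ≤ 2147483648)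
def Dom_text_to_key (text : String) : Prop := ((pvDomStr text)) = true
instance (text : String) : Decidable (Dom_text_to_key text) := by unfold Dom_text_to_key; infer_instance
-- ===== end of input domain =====

set_option maxRecDepth 8192


-- B replaces A's index/slice lookahead loop by a one-pass pending-character state machine (alternative decomposition; a timing run measured it faster by a constant factor).

-- ===== PORT A =====
-- the dict literal, keyed by the (1- or 2-char) Latin token as a char list
def latinToIdx : PySem.Dict (List Char) Int :=
  PySem.Dict.ofList
    [(['F'],0),(['U'],1),(['V'],1),(['T','H'],2),(['O'],3),(['R'],4),(['C'],5),(['K'],5),(['G'],6),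
     (['W'],7),(['H'],8),(['N'],9),(['I'],10),(['J'],11),(['E','O'],12),(['P'],13),(['X'],14),
     (['S'],15),(['T'],16),(['B'],17),(['E'],18),(['M'],19),(['L'],20),(['N','G'],21),(['O','E'],22),
     (['D'],23),(['A'],24),(['A','E'],25),(['Y'],26),(['I','A'],27),(['I','O'],27),(['E','A'],28),(['Q'],5),(['Z'],15)]

-- the while loop of A: i is the index (always ≥ 0 in Python), the single-char branch is
-- duplicated because Python's `continue` skips it only in the digraph branch
def textToKeyLoop (t : List Char) (key : List Int) (i : Nat) : List Int :=
  if h : i < t.length then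
    if i + 1 < t.length then
      match latinToIdx.get? (PySem.List.slice t (some (i : Int)) (some ((i : Int) + 2))) with
      | some v => textToKeyLoop t (key ++ [v]) (i + 2)
      | none =>
        match latinToIdx.get? [t[i]] with
        | some v => textToKeyLoop t (key ++ [v]) (i + 1)
        | none => textToKeyLoop t key (i + 1)
    else
      match latinToIdx.get? [t[i]] with
      | some v => textToKeyLoop t (key ++ [v]) (i + 1)
      | none => textToKeyLoop t key (i + 1)
  else key
termination_by t.length - i

def text_to_key (text : String) : List Int :=
  textToKeyLoop (PySem.Chars.upper text.toList) [] 0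

-- ===== PORT B =====
-- pending = '' in Python is ported as none; pending + c is the 2-char key [p, c]
def altStep (s : Option Char × List Int) (c : Char) : Option Char × List Int :=
  match s with
  | (none, key) => (some c, key)
  | (some p, key) =>
    match latinToIdx.get? [p, c] with
    | some v => (none, key ++ [v])
    | none =>
      match latinToIdx.get? [p] with
      | some v => (some c, key ++ [v])
      | none => (some c, key)

-- the final `if pending:` flush
def altFlush (s : Option Char × List Int) : List Int :=
  match s with
  | (none, key) => key
  | (some p, key) =>
    match latinToIdx.get? [p] with
    | some v => key ++ [v]
    | none => key

def text_to_key_alt (text : String) : List Int :=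
  altFlush ((PySem.Chars.upper text.toList).foldl altStep (none, []))

-- ===== PRECONDITION & SPEC =====
def Spec_text_to_key (text : String) (out : List Int) : Prop := out = text_to_key_alt text
instance (text : String) (out : List Int) : Decidable (Spec_text_to_key text out) := by unfold Spec_text_to_key; infer_instance

-- ===== CLAIM (what is proved, stated in full; the proofs are below) =====
def Claim_equal_text_to_key : Prop := ∀ (text : String), Dom_text_to_key text → Spec_text_to_key text (text_to_key text)

-- ===== LEMMAS AND PROOFS =====

-- the common maximal-munch recursion both loops compute (proof helper only)
def singA (a : Char) : List Int :=
  match latinToIdx.get? [a] with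
  | some v => [v]
  | none => []

def goA : List Char → List Int
  | [] => []
  | [a] => singA a
  | a :: b :: r =>
    match latinToIdx.get? [a, b] with
    | some v => v :: goA r
    | none => singA a ++ goA (b :: r)

-- reduction lemmas for B's step and flush
theorem altStep_none (key : List Int) (c : Char) : altStep (none, key) c = (some c, key) := rfl

theorem altStep_digraph {p c : Char} {v : Int} (key : List Int)
    (hd : latinToIdx.get? [p, c] = some v) :
    altStep (some p, key) c = (none, key ++ [v]) := by simp [altStep, hd]

theorem altStep_single {p c : Char} {v : Int} (key : List Int)
    (hd : latinToIdx.get? [p, c] = none) (hg : latinToIdx.get? [p] = some v) :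
    altStep (some p, key) c = (some c, key ++ [v]) := by simp [altStep, hd, hg]

theorem altStep_skip {p c : Char} (key : List Int)
    (hd : latinToIdx.get? [p, c] = none) (hg : latinToIdx.get? [p] = none) :
    altStep (some p, key) c = (some c, key) := by simp [altStep, hd, hg]

theorem altFlush_none (key : List Int) : altFlush (none, key) = key := rfl

theorem altFlush_some (p : Char) (key : List Int) :
    altFlush (some p, key) = key ++ singA p := by
  unfold altFlush singA
  cases hg : latinToIdx.get? [p] <;> simp [hg]

-- the common maximal-munch recursion, A side
theorem loopA_eq_goA (t : List Char) :
    ∀ n i key, t.length - i = n → textToKeyLoop t key i = key ++ goA (t.drop i) := by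
  intro n
  induction n using Nat.strong_induction_on with
  | _ n ih =>
    intro i key hn
    rw [textToKeyLoop]
    by_cases h : i < t.length
    · rw [dif_pos h]
      have hdrop : t.drop i = t[i] :: t.drop (i + 1) := List.drop_eq_getElem_cons h
      by_cases h2 : i + 1 < t.length
      · have hdrop2 : t.drop (i + 1) = t[i + 1] :: t.drop (i + 2) := by
          have h' := List.drop_eq_getElem_cons h2
          simp only [show i + 1 + 1 = i + 2 from rfl] at h'
          exact h'
        have hslice : PySem.List.slice t (some (i : Int)) (some ((i : Int) + 2))
            = [t[i], t[i + 1]] := by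
          rw [show ((i : Int) + 2) = ((i : Int) + ((2 : Nat) : Int)) from by norm_num,
            PySem.List.slice_natCast_add, hdrop, hdrop2]
          simp [List.take]
        rw [if_pos h2, hslice, hdrop, hdrop2]
        cases hget : latinToIdx.get? [t[i], t[i + 1]] with
        | some v =>
          simp only [hget, goA]
          rw [ih (t.length - (i + 2)) (by omega) (i + 2) (key ++ [v]) rfl]
          simp
        | none =>
          simp only [hget, goA]
          cases hg1 : latinToIdx.get? [t[i]] with
          | some v =>
            simp only [hg1]
            rw [ih (t.length - (i + 1)) (by omega) (i + 1) (key ++ [v]) rfl, hdrop2]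
            simp [singA, hg1]
          | none =>
            simp only [hg1]
            rw [ih (t.length - (i + 1)) (by omega) (i + 1) key rfl, hdrop2]
            simp [singA, hg1]
      · have hlast : t.drop (i + 1) = [] := List.drop_eq_nil_of_le (by omega)
        rw [if_neg h2, hdrop, hlast]
        cases hg1 : latinToIdx.get? [t[i]] with
        | some v =>
          simp only [hg1]
          rw [ih (t.length - (i + 1)) (by omega) (i + 1) (key ++ [v]) rfl, hlast]
          simp [goA, singA, hg1]
        | none =>
          simp only [hg1]
          rw [ih (t.length - (i + 1)) (by omega) (i + 1) key rfl, hlast]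
          simp [goA, singA, hg1]
    · have hnil : t.drop i = [] := List.drop_eq_nil_of_le (by omega)
      rw [dif_neg h, hnil]
      simp [goA]

-- the common maximal-munch recursion, B side
theorem foldB_eq_goA : ∀ (n : Nat) (l : List Char) (p : Char) (key : List Int), l.length = n →
    altFlush (l.foldl altStep (some p, key)) = key ++ goA (p :: l) := by
  intro n
  induction n using Nat.strong_induction_on with
  | _ n ih =>
    intro l p key hn
    cases l with
    | nil =>
      rw [List.foldl_nil, altFlush_some]
      simp [goA]
    | cons c r =>
      rw [List.foldl_cons]
      cases hd : latinToIdx.get? [p, c] with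
      | some v =>
        rw [altStep_digraph key hd]
        simp only [goA, hd]
        cases r with
        | nil => simp [altFlush_none, goA]
        | cons c' r' =>
          rw [List.foldl_cons, altStep_none,
            ih r'.length (by simp at hn; omega) r' c' (key ++ [v]) rfl]
          simp
      | none =>
        cases hg : latinToIdx.get? [p] with
        | some v =>
          rw [altStep_single key hd hg,
            ih r.length (by simp at hn; omega) r c (key ++ [v]) rfl]
          simp [goA, hd, singA, hg]
        | none =>
          rw [altStep_skip key hd hg,
            ih r.length (by simp at hn; omega) r c key rfl]
          simp [goA, hd, singA, hg]

-- ===== VERDICT (by name: the statement is the Claim_ definition above) =====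
theorem text_to_key_spec : Claim_equal_text_to_key := by
  intro text _
  unfold Spec_text_to_key text_to_key text_to_key_alt
  rw [loopA_eq_goA _ _ 0 [] rfl]
  cases h : PySem.Chars.upper text.toList with
  | nil => simp [altFlush_none, goA]
  | cons c r =>
    rw [List.foldl_cons, altStep_none, foldB_eq_goA r.length r c [] rfl]
    simp
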